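-- pv_equiv track=rewrite | github.com/rafaelvlt/python-notes | university-ip-25.1/pset-6-dicts/q1.py | descriptografar
-- ===== SOURCE A (Python) =====
-- def descriptografar(nome_criptografado):
--     """recebe um nome criptografado, realiza a descriptografia e retorna"""
--     ascii_chars = (
--     ' ', '!', '"', '#', '$', '%', '&', "'", '(', ')', '*', '+', ',', '-', '.', '/',
--     '0', '1', '2', '3', '4', '5', '6', '7', '8', '9', ':', ';', '<', '=', '>', '?',
--     '@', 'A', 'B', 'C', 'D', 'E', 'F', 'G', 'H', 'I', 'J', 'K', 'L', 'M', 'N', 'O',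
--     'P', 'Q', 'R', 'S', 'T', 'U', 'V', 'W', 'X', 'Y', 'Z', '[', '\\', ']', '^', '_',
--     '`', 'a', 'b', 'c', 'd', 'e', 'f', 'g', 'h', 'i', 'j', 'k', 'l', 'm', 'n', 'o',
--     'p', 'q', 'r', 's', 't', 'u', 'v', 'w', 'x', 'y', 'z', '{', '|', '}', '~')
--
--     #divide o nome criptografado em duas partes
--     tamanho = len(nome_criptografado)
--     parte1 = list(nome_criptografado[0:tamanho//2])
--     parte2 = list(nome_criptografado[tamanho//2:])
--
--     #shift -1 parte 2
--     for i in range(len(parte2)):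
--         index = ascii_chars.index(parte2[i]) + 1
--         if index >= len(ascii_chars):
--             index = index - len(ascii_chars)
--         parte2[i] = ascii_chars[index]
--     #concatenando e desinvertendo
--     lista_concat = parte1 + parte2
--     lista_concat = lista_concat[::-1]
--
--     #descriptografai final
--     for i in range(len(lista_concat)):
--         index = ascii_chars.index(lista_concat[i]) - 3
--         if index < 0:
--             index = index + len(ascii_chars)
--         lista_concat[i] = ascii_chars[index]
--     nome_descriptografado = "".join(lista_concat)
--     return nome_descriptografado
-- ===== SOURCE B (Python) =====
-- def descriptografar(nome_criptografado):
--     """recebe um nome criptografado, realiza a descriptografia e retorna"""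
--     ascii_chars = ''.join(chr(k) for k in range(32, 127))
--
--     # Single pass: the +1 shift applied to the second half, the reversal and
--     # the uniform -3 shift all commute, so each character gets a net shift of
--     # -3 (first half) or -2 (second half) mod 95, and the result is reversed.
--     n = len(nome_criptografado)
--     metade = n // 2
--     saida = []
--     for i, c in enumerate(nome_criptografado):
--         deslocamento = -3 if i < metade else -2
--         saida.append(ascii_chars[(ascii_chars.index(c) + deslocamento) % 95])
--     return ''.join(reversed(saida))
-- ===== Notes on version B (the rewrite author's own statement) =====
-- stated objective: faster
-- what changed: A's three passes (shift +1 on the second half, reverse the concatenation, shift -3 everywhere) are collapsed into one enumerate pass that applies a net shift of -3 (first half) or -2 (second half) mod 95 per character, followed by a single reversal.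
import Mathlib
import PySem

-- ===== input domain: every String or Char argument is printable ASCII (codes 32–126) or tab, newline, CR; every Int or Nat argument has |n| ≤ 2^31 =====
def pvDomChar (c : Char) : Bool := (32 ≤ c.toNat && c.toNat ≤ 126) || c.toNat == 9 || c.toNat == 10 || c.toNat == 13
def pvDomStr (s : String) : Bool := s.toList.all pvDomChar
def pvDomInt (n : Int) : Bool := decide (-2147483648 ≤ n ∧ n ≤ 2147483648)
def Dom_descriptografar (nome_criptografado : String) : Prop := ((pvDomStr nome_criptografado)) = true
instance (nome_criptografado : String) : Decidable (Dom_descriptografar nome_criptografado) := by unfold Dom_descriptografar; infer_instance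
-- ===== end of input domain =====

-- B replaces A's three passes (shift +1 on the second half, reversal, uniform shift -3)
-- by a single position-dependent pass (net shift -3 / -2 mod 95) followed by a reversal;
-- objective: faster by a constant factor (one table-indexed pass instead of two shift passes).

-- ===== PORT A =====
-- the 95-character tuple `ascii_chars` of A
def pvAscii : List Char := [
  ' ', '!', '"', '#', '$', '%', '&', '\'', '(', ')', '*', '+', ',', '-', '.', '/',
  '0', '1', '2', '3', '4', '5', '6', '7', '8', '9', ':', ';', '<', '=', '>', '?',
  '@', 'A', 'B', 'C', 'D', 'E', 'F', 'G', 'H', 'I', 'J', 'K', 'L', 'M', 'N', 'O',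
  'P', 'Q', 'R', 'S', 'T', 'U', 'V', 'W', 'X', 'Y', 'Z', '[', '\\', ']', '^', '_',
  '`', 'a', 'b', 'c', 'd', 'e', 'f', 'g', 'h', 'i', 'j', 'k', 'l', 'm', 'n', 'o',
  'p', 'q', 'r', 's', 't', 'u', 'v', 'w', 'x', 'y', 'z', '{', '|', '}', '~']

-- body of A's first loop ("shift -1 parte 2"); `.index` raises ValueError on a char
-- outside the tuple (excluded by Pre_), so the total getD form is exact under Pre_
def pvStep1 (c : Char) : Char :=
  let index : Int := (((PySem.List.index? pvAscii c).getD 0 : Nat) : Int) + 1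
  let index := if index ≥ (pvAscii.length : Int) then index - (pvAscii.length : Int) else index
  PySem.List.pyGetD pvAscii index ' '

-- body of A's second loop ("descriptografai final")
def pvStep3 (c : Char) : Char :=
  let index : Int := (((PySem.List.index? pvAscii c).getD 0 : Nat) : Int) - 3
  let index := if index < 0 then index + (pvAscii.length : Int) else index
  PySem.List.pyGetD pvAscii index ' '

def descriptografar (nome_criptografado : String) : String :=
  let tamanho : Int := (nome_criptografado.toList.length : Int)
  let parte1 := PySem.List.slice nome_criptografado.toList (some 0) (some (PySem.Int.floordiv tamanho 2))
  let parte2 := PySem.List.slice nome_criptografado.toList (some (PySem.Int.floordiv tamanho 2)) none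
  let parte2 := parte2.map pvStep1
  let listaConcat := parte1 ++ parte2
  let listaConcat := (PySem.List.slice? listaConcat none none (-1)).getD []
  let listaConcat := listaConcat.map pvStep3
  String.mk listaConcat

-- ===== PORT B =====
-- ''.join(chr(k) for k in range(32, 127))
def pvTabela : List Char := (List.range 95).map (fun k => Char.ofNat (32 + k))

-- one decryption step of B: table[(table.index(c) + desloc) % 95]
def pvDecifra (desloc : Int) (c : Char) : Char :=
  PySem.List.pyGetD pvTabela
    (PySem.Int.mod ((((PySem.List.index? pvTabela c).getD 0 : Nat) : Int) + desloc) 95) ' '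

def descriptografar_alt (nome_criptografado : String) : String :=
  let n : Int := (nome_criptografado.toList.length : Int)
  let metade := PySem.Int.floordiv n 2
  let saida := (PySem.List.enumerate nome_criptografado.toList).map
    (fun ic => pvDecifra (if ic.1 < metade then -3 else -2) ic.2)
  String.mk saida.reverse

-- ===== PRECONDITION & SPEC =====
-- Pre_ excludes exactly the inputs containing a character outside the 95-char table
-- (codes 32..126), on which A's `ascii_chars.index` raises ValueError.
def Pre_descriptografar (nome_criptografado : String) : Prop :=
  (nome_criptografado.toList.all (fun c => 32 ≤ c.toNat && c.toNat ≤ 126)) = true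
instance (nome_criptografado : String) : Decidable (Pre_descriptografar nome_criptografado) := by
  unfold Pre_descriptografar; infer_instance

def pvWitness_descriptografar : String := "Khoor#Zruog"

def Spec_descriptografar (nome_criptografado : String) (out : String) : Prop :=
  out = descriptografar_alt nome_criptografado
instance (nome_criptografado : String) (out : String) : Decidable (Spec_descriptografar nome_criptografado out) := by
  unfold Spec_descriptografar; infer_instance

-- ===== CLAIM (what is proved, stated in full; the proofs are below) =====
def Claim_equal_descriptografar : Prop := ∀ (nome_criptografado : String), Dom_descriptografar nome_criptografado → Pre_descriptografar nome_criptografado → Spec_descriptografar nome_criptografado (descriptografar nome_criptografado)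

-- ===== LEMMAS AND PROOFS =====

-- splitting B's single enumerate pass at the half-way condition
theorem pvEnumSplit {α β : Type} (F H : α → β) (cs : List α) :
    ∀ (k m : Int),
      (PySem.List.enumerate cs k).map (fun ic => if ic.1 < m then F ic.2 else H ic.2)
        = (cs.take (m - k).toNat).map F ++ (cs.drop (m - k).toNat).map H := by
  induction cs with
  | nil => intro k m; simp [PySem.List.enumerate_nil]
  | cons c cs ih =>
    intro k m
    rw [PySem.List.enumerate_cons, List.map_cons]
    by_cases h : k < m
    · have ht : (m - k).toNat = (m - (k + 1)).toNat + 1 := by omega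
      rw [if_pos h, ih (k + 1) m, ht]
      simp
    · have h0 : (m - k).toNat = 0 := by omega
      have h1 : (m - (k + 1)).toNat = 0 := by omega
      rw [if_neg h, ih (k + 1) m, h0, h1]
      simp

set_option maxRecDepth 8192 in
theorem pvTab_getD : ∀ k ∈ List.range 95, pvTabela.getD k ' ' = Char.ofNat (32 + k) := by decide

set_option maxRecDepth 8192 in
theorem pvChar3 : ∀ k ∈ List.range 95,
    pvStep3 (pvTabela.getD k ' ') = pvDecifra (-3) (pvTabela.getD k ' ') := by decide

set_option maxRecDepth 8192 in
theorem pvChar2 : ∀ k ∈ List.range 95,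
    pvStep3 (pvStep1 (pvTabela.getD k ' ')) = pvDecifra (-2) (pvTabela.getD k ' ') := by decide

theorem pvCanon (c : Char) (h1 : 32 ≤ c.toNat) (h2 : c.toNat ≤ 126) :
    c = pvTabela.getD (c.toNat - 32) ' ' := by
  have hm : c.toNat - 32 ∈ List.range 95 := by
    rw [List.mem_range]; omega
  rw [pvTab_getD _ hm]
  have h32 : 32 + (c.toNat - 32) = c.toNat := by omega
  rw [h32, Char.ofNat_toNat]

theorem pvCharA (c : Char) (h1 : 32 ≤ c.toNat) (h2 : c.toNat ≤ 126) :
    pvStep3 c = pvDecifra (-3) c := by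
  rw [pvCanon c h1 h2]
  exact pvChar3 _ (by rw [List.mem_range]; omega)

theorem pvCharB (c : Char) (h1 : 32 ≤ c.toNat) (h2 : c.toNat ≤ 126) :
    pvStep3 (pvStep1 c) = pvDecifra (-2) c := by
  rw [pvCanon c h1 h2]
  exact pvChar2 _ (by rw [List.mem_range]; omega)

-- ===== VERDICT (by name: the statement is the Claim_ definition above) =====
set_option maxRecDepth 8192 in
theorem descriptografar_spec : Claim_equal_descriptografar := by
  intro s _ hpre
  unfold Pre_descriptografar at hpre
  simp only [List.all_eq_true, Bool.and_eq_true, decide_eq_true_eq] at hpre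
  unfold Spec_descriptografar
  simp only [descriptografar, descriptografar_alt]
  have hdiv : PySem.Int.floordiv ((s.toList.length : Nat) : Int) 2 = ((s.toList.length / 2 : Nat) : Int) := by
    exact_mod_cast PySem.Int.floordiv_natCast s.toList.length 2
  have hlam : (fun ic : Int × Char =>
        pvDecifra (if ic.1 < PySem.Int.floordiv (s.toList.length : Int) 2 then -3 else -2) ic.2)
      = fun ic : Int × Char =>
        if ic.1 < PySem.Int.floordiv (s.toList.length : Int) 2
        then pvDecifra (-3) ic.2 else pvDecifra (-2) ic.2 := by
    funext ic
    exact apply_ite (fun d => pvDecifra d ic.2) _ _ _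
  rw [hlam, pvEnumSplit, PySem.List.slice?_none_none_neg_one, Option.getD_some, hdiv,
    PySem.List.slice_zero_start, PySem.List.slice_to_natCast, PySem.List.slice_from_natCast]
  simp only [Int.sub_zero, Int.toNat_natCast]
  congr 1
  rw [List.map_reverse, List.map_append, List.map_map]
  have e1 : List.map pvStep3 (List.take (s.toList.length / 2) s.toList)
      = List.map (pvDecifra (-3)) (List.take (s.toList.length / 2) s.toList) :=
    List.map_congr_left fun c hc => by
      obtain ⟨h1, h2⟩ := hpre c (List.mem_of_mem_take hc)
      exact pvCharA c h1 h2
  have e2 : List.map (pvStep3 ∘ pvStep1) (List.drop (s.toList.length / 2) s.toList)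
      = List.map (pvDecifra (-2)) (List.drop (s.toList.length / 2) s.toList) :=
    List.map_congr_left fun c hc => by
      obtain ⟨h1, h2⟩ := hpre c (List.mem_of_mem_drop hc)
      exact pvCharB c h1 h2
  rw [e1, e2]
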